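-- pv_equiv track=rewrite | github.com/Stefano-Salvatori/transformer_rl | src/amr_utils.py | _clean_tokens
-- ===== SOURCE A (Python) =====
-- def _clean_tokens(tokens):
--     line = " ".join(tokens)
--     if "<" in line and ">" in line:
--         tokens_reformat = []
--         is_xml = False
--         for i, tok in enumerate(tokens):
--             if is_xml:
--                 tokens_reformat[-1] += "_" + tok
--                 if ">" in tok:
--                     is_xml = False
--             else:
--                 tokens_reformat.append(tok)
--                 if tok.startswith("<") and not ">" in tok:
--                     if len(tok) > 1 and (tok[1].isalpha() or tok[1] == "/"):
--                         if i + 1 < len(tokens) and "=" in tokens[i + 1]: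
--                             is_xml = True
--         tokens = tokens_reformat
--     return tokens
-- ===== SOURCE B (Python) =====
-- def _starts_block(tok, rest):
--     return (tok.startswith("<") and ">" not in tok and len(tok) > 1
--             and (tok[1].isalpha() or tok[1] == "/")
--             and rest and "=" in rest[0])
--
--
-- def _take_block(rest):
--     """Split off the tokens of an open XML block: everything up to and
--     including the first token containing '>' (all of rest if none)."""
--     for k, t in enumerate(rest):
--         if ">" in t:
--             return rest[:k + 1], rest[k + 1:]
--     return rest, []
--
--
-- def _clean_tokens(tokens):
--     line = " ".join(tokens)
--     if not ("<" in line and ">" in line):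
--         return tokens
--     result = []
--     rest = tokens
--     while rest:
--         tok, rest = rest[0], rest[1:]
--         if _starts_block(tok, rest):
--             block, rest = _take_block(rest)
--             result.append("_".join([tok] + block))
--         else:
--             result.append(tok)
--     return result
-- ===== Notes on version B (the rewrite author's own statement) =====
-- stated objective: simpler
-- what changed: Replaced A's is_xml-flag loop that mutates the last appended element with a block-grouping scan: a helper splits off each open XML block (up to and including the first token containing '>') and the merged token is emitted in one step as a '_'-join.
import Mathlib
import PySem

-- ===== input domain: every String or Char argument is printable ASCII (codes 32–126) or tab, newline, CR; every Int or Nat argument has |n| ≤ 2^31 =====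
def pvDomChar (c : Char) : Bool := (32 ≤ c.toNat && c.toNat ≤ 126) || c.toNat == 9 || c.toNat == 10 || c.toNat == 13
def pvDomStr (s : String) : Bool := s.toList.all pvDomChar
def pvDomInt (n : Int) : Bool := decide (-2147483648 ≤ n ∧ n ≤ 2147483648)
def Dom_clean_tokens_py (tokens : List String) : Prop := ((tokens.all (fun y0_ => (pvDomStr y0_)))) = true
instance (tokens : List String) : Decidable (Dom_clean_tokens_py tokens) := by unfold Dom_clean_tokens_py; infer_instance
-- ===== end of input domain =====

-- B replaces A's is_xml flag / mutate-last-element loop by a block-grouping decomposition: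
-- split off each open XML block with a helper and emit its '_'-join in one step (objective: simpler).

-- ===== PORT A =====
-- tokens_reformat[-1] += s  (only reached when the list is nonempty)
def pvAddToLast : List String → String → List String
  | [], _ => []
  | [x], s => [x ++ s]
  | x :: xs, s => x :: pvAddToLast xs s

-- the for-loop of A over enumerate(tokens); state = (tokens_reformat, is_xml); is_xml matched as true/false
def pvALoop (tokens : List String) : List (Int × String) → List String → Bool → List String
  | [], acc, _ => acc
  | (_, tok) :: rest, acc, true =>
    if PySem.Str.isIn ">" tok then pvALoop tokens rest (pvAddToLast acc ("_" ++ tok)) false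
    else pvALoop tokens rest (pvAddToLast acc ("_" ++ tok)) true
  | (i, tok) :: rest, acc, false =>
    if PySem.Str.startswith tok "<" && !(PySem.Str.isIn ">" tok) then
      if PySem.Str.len tok > 1 &&
          (match PySem.Str.pyGet? tok 1 with
           | some c => PySem.Chars.isalpha c || (c == '/')
           | none => false) then
        -- tokens[i+1]: guarded by i+1 < len(tokens), so pyGetD is exact here
        if (i + 1 < (tokens.length : Int)) && PySem.Str.isIn "=" (PySem.List.pyGetD tokens (i + 1) "") then
          pvALoop tokens rest (acc ++ [tok]) true
        else pvALoop tokens rest (acc ++ [tok]) false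
      else pvALoop tokens rest (acc ++ [tok]) false
    else pvALoop tokens rest (acc ++ [tok]) false

def clean_tokens_py (tokens : List String) : List String :=
  let line := PySem.Str.join " " tokens
  if PySem.Str.isIn "<" line && PySem.Str.isIn ">" line then
    pvALoop tokens (PySem.List.enumerate tokens 0) [] false
  else tokens

-- ===== PORT B =====
def pvStartsBlock (tok : String) (rest : List String) : Bool :=
  PySem.Str.startswith tok "<" && !(PySem.Str.isIn ">" tok) && PySem.Str.len tok > 1 &&
  (match PySem.Str.pyGet? tok 1 with
   | some c => PySem.Chars.isalpha c || (c == '/')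
   | none => false) &&
  (match rest with
   | [] => false
   | r :: _ => PySem.Str.isIn "=" r)

-- tokens of the open block: up to and including the first token containing '>'
def pvTakeBlock : List String → List String × List String
  | [] => ([], [])
  | t :: r =>
    if PySem.Str.isIn ">" t then ([t], r)
    else
      let p := pvTakeBlock r
      (t :: p.1, p.2)

theorem pvTakeBlock_snd_length (l : List String) : (pvTakeBlock l).2.length ≤ l.length := by
  induction l with
  | nil => simp [pvTakeBlock]
  | cons t r ih =>
    simp only [pvTakeBlock]
    split
    · simp
    · simpa using Nat.le_succ_of_le ih

def pvBLoop : List String → List String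
  | [] => []
  | tok :: rest =>
    if pvStartsBlock tok rest then
      let p := pvTakeBlock rest
      PySem.Str.join "_" (tok :: p.1) :: pvBLoop p.2
    else tok :: pvBLoop rest
termination_by l => l.length
decreasing_by
  · exact Nat.lt_succ_of_le (pvTakeBlock_snd_length rest)
  · simp

def clean_tokens_py_alt (tokens : List String) : List String :=
  let line := PySem.Str.join " " tokens
  if !(PySem.Str.isIn "<" line && PySem.Str.isIn ">" line) then tokens
  else pvBLoop tokens

-- ===== PRECONDITION & SPEC =====
def Spec_clean_tokens_py (tokens : List String) (out : List String) : Prop := out = clean_tokens_py_alt tokens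
instance (tokens : List String) (out : List String) : Decidable (Spec_clean_tokens_py tokens out) := by unfold Spec_clean_tokens_py; infer_instance

-- ===== CLAIM (what is proved, stated in full; the proofs are below) =====
def Claim_equal_clean_tokens_py : Prop := ∀ (tokens : List String), Dom_clean_tokens_py tokens → Spec_clean_tokens_py tokens (clean_tokens_py tokens)

-- ===== LEMMAS AND PROOFS =====

theorem pvAddToLast_snoc (xs : List String) (x s : String) :
    pvAddToLast (xs ++ [x]) s = xs ++ [x ++ s] := by
  induction xs with
  | nil => rfl
  | cons y ys ih =>
    cases ys with
    | nil => simp [pvAddToLast]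
    | cons z zs => simpa [pvAddToLast] using ih

theorem pvString_append_assoc (a b c : String) : a ++ b ++ c = a ++ (b ++ c) := by
  rw [← String.toList_inj]
  simp [String.toList_append]

theorem pvJoin_glue (a b : String) (l : List String) :
    PySem.Str.join "_" ((a ++ "_" ++ b) :: l) = a ++ "_" ++ PySem.Str.join "_" (b :: l) := by
  rw [← String.toList_inj]
  cases l with
  | nil =>
    have h1 := PySem.Str.toList_join "_" [a ++ "_" ++ b]
    have h2 := PySem.Str.toList_join "_" [b]
    simp only [List.map, PySem.Chars.join_singleton] at h1 h2
    simp [h1, h2, String.toList_append]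
  | cons c l' =>
    have h1 := PySem.Str.toList_join "_" ((a ++ "_" ++ b) :: c :: l')
    have h2 := PySem.Str.toList_join "_" (b :: c :: l')
    simp only [List.map, PySem.Chars.join_cons_cons] at h1 h2
    simp [h1, h2, String.toList_append]

theorem pvJoin_single (a : String) : PySem.Str.join "_" [a] = a := by
  rw [← String.toList_inj]
  have h := PySem.Str.toList_join "_" [a]
  simpa [PySem.Chars.join_singleton] using h

theorem pvJoin_cons (a b : String) (l : List String) :
    PySem.Str.join "_" (a :: b :: l) = a ++ "_" ++ PySem.Str.join "_" (b :: l) := by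
  rw [← String.toList_inj]
  have h1 := PySem.Str.toList_join "_" (a :: b :: l)
  have h2 := PySem.Str.toList_join "_" (b :: l)
  simp only [List.map, PySem.Chars.join_cons_cons] at h1
  simp [h1, h2, String.toList_append]

theorem pvJoin_pair (a b : String) : PySem.Str.join "_" [a, b] = a ++ "_" ++ b := by
  rw [← String.toList_inj]
  have h := PySem.Str.toList_join "_" [a, b]
  simp only [List.map, PySem.Chars.join_cons_cons, PySem.Chars.join_singleton] at h
  simp [h, String.toList_append]

theorem pvCond_eq (tokens : List String) (n : Nat) (tok : String) (rest : List String)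
    (hdrop : tokens.drop n = tok :: rest) :
    ((PySem.Str.startswith tok "<" && !(PySem.Str.isIn ">" tok)) &&
     ((PySem.Str.len tok > 1 &&
        (match PySem.Str.pyGet? tok 1 with
         | some c => PySem.Chars.isalpha c || (c == '/')
         | none => false)) &&
      (((n : Int) + 1 < (tokens.length : Int)) && PySem.Str.isIn "=" (PySem.List.pyGetD tokens ((n : Int) + 1) ""))))
    = pvStartsBlock tok rest := by
  have hlen' : tokens.length = n + (1 + rest.length) := by
    have h1 : n ≤ tokens.length := by
      by_contra h
      have h2 : tokens.drop n = [] := List.drop_eq_nil_of_le (by omega)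
      rw [h2] at hdrop
      simp at hdrop
    have h3 := congrArg List.length hdrop
    simp [List.length_drop] at h3
    omega
  have hget : PySem.List.pyGetD tokens ((n : Int) + 1) "" = rest.getD 0 "" := by
    have hc : ((n : Int) + 1) = ((n + 1 : Nat) : Int) := by push_cast; ring
    rw [hc, PySem.List.pyGetD_natCast]
    have h4 : tokens.getD (n + 1) "" = (tokens.drop n).getD 1 "" := by
      simp [List.getD, List.getElem?_drop]
    rw [h4, hdrop]
    rfl
  cases rest with
  | nil =>
    have h0 : ¬ ((n : Int) + 1 < (tokens.length : Int)) := by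
      simp at hlen'
      omega
    simp [pvStartsBlock, h0]
  | cons r rs =>
    have h1 : ((n : Int) + 1 < (tokens.length : Int)) := by
      simp at hlen'
      omega
    rw [hget]
    simp only [List.getD, List.getElem?_cons_zero, Option.getD_some]
    simp [pvStartsBlock, h1, Bool.and_assoc]

theorem pvMain (tokens : List String) :
    ∀ N suf, suf.length ≤ N → ∀ n : Nat, tokens.drop n = suf →
      (∀ acc, pvALoop tokens (PySem.List.enumerate suf (n : Int)) acc false = acc ++ pvBLoop suf)
      ∧ (∀ (accPre : List String) (last : String),
          pvALoop tokens (PySem.List.enumerate suf (n : Int)) (accPre ++ [last]) true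
          = accPre ++ (PySem.Str.join "_" (last :: (pvTakeBlock suf).1) :: pvBLoop (pvTakeBlock suf).2)) := by
  intro N
  induction N with
  | zero =>
    intro suf hle n hdrop
    have hnil : suf = [] := List.eq_nil_of_length_eq_zero (by omega)
    subst hnil
    refine ⟨fun acc => by simp [PySem.List.enumerate, pvALoop, pvBLoop], fun accPre last => ?_⟩
    simp [PySem.List.enumerate, pvALoop, pvTakeBlock, pvBLoop, pvJoin_single]
  | succ N ih =>
    intro suf hle n hdrop
    cases suf with
    | nil =>
      refine ⟨fun acc => by simp [PySem.List.enumerate, pvALoop, pvBLoop], fun accPre last => ?_⟩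
      simp [PySem.List.enumerate, pvALoop, pvTakeBlock, pvBLoop, pvJoin_single]
    | cons tok rest =>
      have hdrop' : tokens.drop (n + 1) = rest := by
        have h := congrArg (List.drop 1) hdrop
        simpa [List.drop_drop, Nat.add_comm] using h
      obtain ⟨hm, hx⟩ := ih rest (by simp at hle; omega) (n + 1) hdrop'
      have hcast : (((n + 1 : Nat)) : Int) = ((n : Int) + 1) := by push_cast; ring
      rw [hcast] at hm hx
      constructor
      · -- is_xml = False step
        intro acc
        have hcond := pvCond_eq tokens n tok rest hdrop
        rw [PySem.List.enumerate_cons]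
        rw [pvBLoop, ← hcond]
        simp only [pvALoop]
        cases hA : (PySem.Str.startswith tok "<" && !(PySem.Str.isIn ">" tok)) <;>
        cases hB : (PySem.Str.len tok > 1 &&
            (match PySem.Str.pyGet? tok 1 with
             | some c => PySem.Chars.isalpha c || (c == '/')
             | none => false)) <;>
        cases hC : (((n : Int) + 1) < (tokens.length : Int) &&
            PySem.Str.isIn "=" (PySem.List.pyGetD tokens ((n : Int) + 1) "")) <;>
        simp only [Bool.false_and, Bool.true_and, Bool.and_false, Bool.and_true,
          Bool.false_eq_true, if_false, if_true, ite_true, ite_false, hm, hx] <;>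
        simp [hm, hx acc tok]
      · -- is_xml = True step
        intro accPre last
        rw [PySem.List.enumerate_cons]
        simp only [pvALoop]
        rw [pvAddToLast_snoc]
        cases hgt : PySem.Str.isIn ">" tok with
        | true =>
          rw [if_pos rfl]
          rw [hm (accPre ++ [last ++ ("_" ++ tok)])]
          have htb : pvTakeBlock (tok :: rest) = ([tok], rest) := by
            rw [pvTakeBlock, if_pos hgt]
          rw [htb]
          simp only [List.append_assoc, List.singleton_append]
          congr 2
          rw [pvJoin_pair, pvString_append_assoc]
        | false =>
          rw [if_neg (by simp)]
          rw [hx accPre (last ++ ("_" ++ tok))]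
          have htb : pvTakeBlock (tok :: rest) = (tok :: (pvTakeBlock rest).1, (pvTakeBlock rest).2) := by
            rw [pvTakeBlock, if_neg (by rw [hgt]; simp)]
          rw [htb]
          congr 2
          rw [← pvString_append_assoc, pvJoin_glue]
          simp [pvJoin_cons]

-- ===== VERDICT (by name: the statement is the Claim_ definition above) =====
theorem clean_tokens_py_spec : Claim_equal_clean_tokens_py := by
  intro tokens _
  unfold Spec_clean_tokens_py clean_tokens_py clean_tokens_py_alt
  cases h : (PySem.Str.isIn "<" (PySem.Str.join " " tokens) && PySem.Str.isIn ">" (PySem.Str.join " " tokens)) with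
  | true =>
    have hmain := (pvMain tokens tokens.length tokens (le_refl _) 0 (by simp)).1 []
    simp only [h]
    simp only [Bool.not_true, Bool.false_eq_true, if_false, if_true, ite_true, ite_false]
    simpa using hmain
  | false =>
    simp only [h]
    simp only [Bool.not_false, Bool.false_eq_true, if_false, if_true, ite_true, ite_false]
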